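-- pv_equiv track=rewrite | github.com/voltsparx/Sylica-X | core/intelligence/intelligence_engine.py | _normalize_anomaly_map
-- ===== SOURCE A (Python) =====
-- from collections.abc import Mapping, Sequence
-- from typing import Any
--
-- def _normalize_anomaly_map(anomalies: Sequence[Mapping[str, Any]]) -> dict[str, list[str]]:
--     mapped: dict[str, list[str]] = {}
--     for anomaly in anomalies:
--         entity_id = str(anomaly.get("entity_id", "")).strip()
--         if not entity_id:
--             continue
--         reason = str(anomaly.get("reason", "anomaly")).strip().lower()
--         mapped.setdefault(entity_id, []).append(reason)
--     return mapped
-- ===== SOURCE B (Python) =====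
-- def _normalize_anomaly_map(anomalies):
--     # One pass to build normalized (entity_id, reason) pairs, then group by
--     # first-occurrence key order with a per-key scan.
--     pairs = []
--     for anomaly in anomalies:
--         entity_id = str(anomaly.get("entity_id", "")).strip()
--         if entity_id:
--             pairs.append((entity_id,
--                           str(anomaly.get("reason", "anomaly")).strip().lower()))
--     keys = list(dict.fromkeys(e for e, _ in pairs))
--     return {k: [r for e, r in pairs if e == k] for k in keys}
-- ===== Notes on version B (the rewrite author's own statement) =====
-- stated objective: alternative
-- what changed: B replaces A's incremental dict-with-setdefault build by a pair-list pass followed by grouping: dedup of first-occurrence keys, then one comprehension per key collecting its reasons.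
import Mathlib
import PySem

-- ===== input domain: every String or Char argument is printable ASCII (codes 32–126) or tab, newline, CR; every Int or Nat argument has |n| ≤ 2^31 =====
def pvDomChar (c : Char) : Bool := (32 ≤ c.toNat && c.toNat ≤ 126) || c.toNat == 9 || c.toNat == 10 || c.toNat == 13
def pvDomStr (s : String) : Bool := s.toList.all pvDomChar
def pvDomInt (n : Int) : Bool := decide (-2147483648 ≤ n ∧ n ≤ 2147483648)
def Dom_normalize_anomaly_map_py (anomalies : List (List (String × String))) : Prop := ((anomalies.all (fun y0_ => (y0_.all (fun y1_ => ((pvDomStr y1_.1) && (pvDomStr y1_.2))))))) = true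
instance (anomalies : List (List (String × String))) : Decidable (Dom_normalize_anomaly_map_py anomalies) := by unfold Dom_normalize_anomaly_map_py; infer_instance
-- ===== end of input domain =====

-- B rebuilds the same grouped dict by a pair-list pass + group-by-first-occurrence-key instead of A's incremental setdefault dict (alternative decomposition, same result).


-- ===== PORT A =====
def pvLookup (a : List (String × String)) (k : String) (dflt : String) : String :=
  (PySem.Dict.mk a).getD k dflt

-- literal port of A's loop: dict state as assoc list; setdefault(k, []).append(r)
def pvSetdefaultAppend (d : List (String × List String)) (k : String) (r : String) :
    List (String × List String) :=
  match d with
  | [] => [(k, [r])]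
  | (k', rs) :: t =>
      if k' = k then (k', rs ++ [r]) :: t else (k', rs) :: pvSetdefaultAppend t k r

def pvStepA (d : List (String × List String)) (a : List (String × String)) :
    List (String × List String) :=
  let entity_id := PySem.Str.strip (pvLookup a "entity_id" "")
  if entity_id = "" then d
  else
    let reason := PySem.Str.lower (PySem.Str.strip (pvLookup a "reason" "anomaly"))
    pvSetdefaultAppend d entity_id reason

def normalize_anomaly_map_py (anomalies : List (List (String × String))) :
    List (String × List String) :=
  anomalies.foldl pvStepA []

-- ===== PORT B =====
-- single pass: normalized (entity_id, reason) pairs, skipping empty entity ids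
def pvPairs (anomalies : List (List (String × String))) : List (String × String) :=
  anomalies.filterMap (fun a =>
    let entity_id := PySem.Str.strip (pvLookup a "entity_id" "")
    if entity_id = "" then none
    else some (entity_id, PySem.Str.lower (PySem.Str.strip (pvLookup a "reason" "anomaly"))))

def normalize_anomaly_map_py_alt (anomalies : List (List (String × String))) :
    List (String × List String) :=
  let pairs := pvPairs anomalies
  let keys := PySem.List.dedup (pairs.map (·.1))
  keys.map (fun k => (k, (pairs.filter (fun p => p.1 == k)).map (·.2)))

-- ===== PRECONDITION & SPEC =====
def Spec_normalize_anomaly_map_py (anomalies : List (List (String × String))) (out : List (String × List String)) : Prop := out = normalize_anomaly_map_py_alt anomalies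
instance (anomalies : List (List (String × String))) (out : List (String × List String)) : Decidable (Spec_normalize_anomaly_map_py anomalies out) := by unfold Spec_normalize_anomaly_map_py; infer_instance

-- ===== CLAIM (what is proved, stated in full; the proofs are below) =====
def Claim_equal_normalize_anomaly_map_py : Prop := ∀ (anomalies : List (List (String × String))), Dom_normalize_anomaly_map_py anomalies → Spec_normalize_anomaly_map_py anomalies (normalize_anomaly_map_py anomalies)

-- ===== LEMMAS AND PROOFS =====

-- grouping of a pair list, exactly the body of the _alt port
def pvGroup (ps : List (String × String)) : List (String × List String) :=
  (PySem.List.dedup (ps.map (·.1))).map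
    (fun k => (k, (ps.filter (fun p => p.1 == k)).map (·.2)))

lemma pvFoldA_eq_foldPairs (anomalies : List (List (String × String)))
    (d : List (String × List String)) :
    anomalies.foldl pvStepA d
      = (pvPairs anomalies).foldl (fun d p => pvSetdefaultAppend d p.1 p.2) d := by
  induction anomalies generalizing d with
  | nil => rfl
  | cons a rest ih =>
      simp only [List.foldl_cons, pvPairs, List.filterMap_cons, pvStepA]
      by_cases h : PySem.Str.strip (pvLookup a "entity_id" "") = ""
      · simp only [h, if_true]
        exact ih d
      · simp only [if_neg h, List.foldl_cons]
        exact ih _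

lemma pvDedup_append_singleton (xs : List String) (x : String) :
    PySem.List.dedup (xs ++ [x])
      = if x ∈ xs then PySem.List.dedup xs else PySem.List.dedup xs ++ [x] := by
  have h1 : PySem.List.dedup (xs ++ [x]) = PySem.Set.add (PySem.List.dedup xs) x := by
    simp [PySem.List.dedup, PySem.Set.ofList, List.foldl_append]
  rw [h1, PySem.Set.add]
  by_cases h : x ∈ xs <;> simp [h]

lemma pvSda_of_not_mem (d : List (String × List String)) (k r : String)
    (h : k ∉ d.map (·.1)) :
    pvSetdefaultAppend d k r = d ++ [(k, [r])] := by
  induction d with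
  | nil => rfl
  | cons e t ih =>
      obtain ⟨k', rs⟩ := e
      simp only [List.map_cons, List.mem_cons, not_or] at h
      have hne : ¬ (k' = k) := fun he => h.1 he.symm
      simp [pvSetdefaultAppend, hne, ih h.2]

lemma pvSda_map (ks : List String) (g : String → List String) (k r : String)
    (hk : k ∈ ks) (hn : ks.Nodup) :
    pvSetdefaultAppend (ks.map (fun k' => (k', g k'))) k r
      = ks.map (fun k' => (k', if k' = k then g k' ++ [r] else g k')) := by
  induction ks with
  | nil => cases hk
  | cons a t ih =>
      simp only [List.map_cons, pvSetdefaultAppend]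
      by_cases h : a = k
      · subst h
        rw [if_pos rfl]
        congr 1
        · simp
        refine (List.map_congr_left fun k' hk' => ?_).symm
        have hne : ¬ (k' = a) := fun he => (List.nodup_cons.mp hn).1 (he ▸ hk')
        simp [hne]
      · have hkt : k ∈ t := by
          rcases List.mem_cons.mp hk with h1 | h1
          · exact absurd h1.symm h
          · exact h1
        simp [h, ih hkt (List.nodup_cons.mp hn).2]

lemma pvFoldPairs_eq_group (ps : List (String × String)) :
    ps.foldl (fun d p => pvSetdefaultAppend d p.1 p.2) [] = pvGroup ps := by
  induction ps using List.reverseRecOn with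
  | nil => rfl
  | append_singleton ps p ih =>
      obtain ⟨k, r⟩ := p
      rw [List.foldl_append, List.foldl_cons, List.foldl_nil, ih]
      by_cases hk : k ∈ ps.map (·.1)
      · have hkd : k ∈ PySem.List.dedup (ps.map (·.1)) :=
          (PySem.List.mem_dedup _ _).mpr hk
        show pvSetdefaultAppend
            ((PySem.List.dedup (ps.map (·.1))).map
              (fun k' => (k', (ps.filter (fun p => p.1 == k')).map (·.2)))) k r
          = pvGroup (ps ++ [(k, r)])
        rw [pvSda_map _ _ k r hkd (PySem.List.nodup_dedup _)]
        simp only [pvGroup, List.map_append, List.map_cons, List.map_nil,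
          pvDedup_append_singleton]
        rw [if_pos hk]
        refine List.map_congr_left fun k' _ => ?_
        by_cases h : k' = k
        · subst h
          simp [List.filter_append]
        · have hne : k ≠ k' := Ne.symm h
          simp [List.filter_append, h, hne]
      · have hkd : k ∉ PySem.List.dedup (ps.map (·.1)) := fun hm =>
          hk ((PySem.List.mem_dedup _ _).mp hm)
        have hkeys : k ∉ (pvGroup ps).map (·.1) := by
          simpa [pvGroup, List.map_map, Function.comp] using hkd
        rw [pvSda_of_not_mem _ _ _ hkeys]
        simp only [pvGroup, List.map_append, List.map_cons, List.map_nil,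
          pvDedup_append_singleton]
        rw [if_neg hk, List.map_append]
        congr 1
        · refine List.map_congr_left fun k' hk' => ?_
          have h : k' ≠ k := fun he => hkd (he ▸ hk')
          simp [List.filter_append, Ne.symm h]
        · have hnil : ps.filter (fun p => p.1 == k) = [] := by
            rw [List.filter_eq_nil_iff]
            intro p hp hbe
            exact hk (List.mem_map.mpr ⟨p, hp, by simpa using hbe⟩)
          simp [List.filter_append, hnil]

-- ===== VERDICT (by name: the statement is the Claim_ definition above) =====
theorem normalize_anomaly_map_py_spec : Claim_equal_normalize_anomaly_map_py := by
  intro anomalies _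
  unfold Spec_normalize_anomaly_map_py normalize_anomaly_map_py normalize_anomaly_map_py_alt
  rw [pvFoldA_eq_foldPairs, pvFoldPairs_eq_group]
  rfl
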